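-- pv_equiv track=rewrite | github.com/sent1nel101/SyphaAIChat | app.py | _preserve_emojis
-- ===== SOURCE A (Python) =====
-- def _preserve_emojis(text):
--     """Preserve common emojis and icons during HTML escaping"""
--     # Common emojis that should be preserved
--     emoji_map = {
--         '&amp;#x2713;': '✓',  # checkmark
--         '&amp;#x2717;': '✗',  # cross mark
--         '&amp;#x2192;': '→',  # right arrow
--         '&amp;#x2190;': '←',  # left arrow
--         '&amp;#x2191;': '↑',  # up arrow
--         '&amp;#x2193;': '↓',  # down arrow
--     }
--
--     for escaped, emoji in emoji_map.items():
--         text = text.replace(escaped, emoji)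
--
--     return text
-- ===== SOURCE B (Python) =====
-- def _preserve_emojis(text):
--     """Preserve common emojis and icons during HTML escaping"""
--     emoji_map = {
--         '&amp;#x2713;': '\u2713',  # checkmark
--         '&amp;#x2717;': '\u2717',  # cross mark
--         '&amp;#x2192;': '\u2192',  # right arrow
--         '&amp;#x2190;': '\u2190',  # left arrow
--         '&amp;#x2191;': '\u2191',  # up arrow
--         '&amp;#x2193;': '\u2193',  # down arrow
--     }
--     out = []
--     i = 0
--     n = len(text)
--     while i < n:
--         ch = text[i]
--         if ch == '&':
--             repl = emoji_map.get(text[i:i+12])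
--             if repl is not None:
--                 out.append(repl)
--                 i += 12
--                 continue
--         out.append(ch)
--         i += 1
--     return ''.join(out)
-- ===== Notes on version B (the rewrite author's own statement) =====
-- stated objective: alternative
-- what changed: One left-to-right scan that, at each ampersand character, looks the 12-char chunk up in the dict and emits the emoji or copies the char, instead of six sequential full-string replace passes.
import Mathlib
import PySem

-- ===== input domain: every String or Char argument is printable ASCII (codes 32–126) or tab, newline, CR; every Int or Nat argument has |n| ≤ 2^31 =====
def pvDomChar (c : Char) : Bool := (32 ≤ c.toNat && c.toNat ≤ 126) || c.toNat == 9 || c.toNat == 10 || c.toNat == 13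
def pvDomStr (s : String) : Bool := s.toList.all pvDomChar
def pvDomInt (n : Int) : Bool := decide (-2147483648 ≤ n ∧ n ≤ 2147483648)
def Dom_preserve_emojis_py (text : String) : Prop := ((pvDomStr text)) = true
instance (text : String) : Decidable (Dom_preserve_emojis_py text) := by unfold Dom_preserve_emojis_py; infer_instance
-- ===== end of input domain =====

-- B replaces A's six sequential full-string replace passes by ONE left-to-right scan
-- with a 12-char dict lookup at each '&' (objective: alternative algorithm, same result).

-- ===== PORT A =====
-- the dict literal of A, as an association list in insertion order
def pvEmojiMap : List (String × String) :=
  [("&amp;#x2713;", "✓"), ("&amp;#x2717;", "✗"), ("&amp;#x2192;", "→"),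
   ("&amp;#x2190;", "←"), ("&amp;#x2191;", "↑"), ("&amp;#x2193;", "↓")]

-- for escaped, emoji in emoji_map.items(): text = text.replace(escaped, emoji)
def preserve_emojis_py (text : String) : String :=
  pvEmojiMap.foldl (fun t p => PySem.Str.replace t p.1 p.2) text

-- ===== PORT B =====
-- B's emoji_map over char lists (B scans char by char)
def pvMapC : List (List Char × List Char) :=
  [(['&','a','m','p',';','#','x','2','7','1','3',';'], ['✓']),
   (['&','a','m','p',';','#','x','2','7','1','7',';'], ['✗']),
   (['&','a','m','p',';','#','x','2','1','9','2',';'], ['→']),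
   (['&','a','m','p',';','#','x','2','1','9','0',';'], ['←']),
   (['&','a','m','p',';','#','x','2','1','9','1',';'], ['↑']),
   (['&','a','m','p',';','#','x','2','1','9','3',';'], ['↓'])]

-- B's while loop: at '&' look up the 12-char chunk (emoji_map.get(text[i:i+12]));
-- on a hit emit the emoji and jump 12, otherwise copy one char
def pvBLoop : List Char → List Char
  | [] => []
  | c :: t =>
    if c = '&' then
      match pvMapC.lookup (List.take 12 (c :: t)) with
      | some v => v ++ pvBLoop (List.drop 11 t)
      | none => c :: pvBLoop t
    else c :: pvBLoop t
termination_by l => l.length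
decreasing_by all_goals (simp [List.length_drop]; try omega)

def preserve_emojis_py_alt (text : String) : String :=
  String.ofList (pvBLoop text.toList)

-- ===== PRECONDITION & SPEC =====
def Spec_preserve_emojis_py (text : String) (out : String) : Prop := out = preserve_emojis_py_alt text
instance (text : String) (out : String) : Decidable (Spec_preserve_emojis_py text out) := by unfold Spec_preserve_emojis_py; infer_instance

-- ===== CLAIM (what is proved, stated in full; the proofs are below) =====
def Claim_equal_preserve_emojis_py : Prop := ∀ (text : String), Dom_preserve_emojis_py text → Spec_preserve_emojis_py text (preserve_emojis_py text)

-- ===== LEMMAS AND PROOFS =====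

-- Python str.replace (nonempty pattern), in direct-recursion form
def pvRepl (old new : List Char) : List Char → List Char
  | [] => []
  | c :: t =>
    if old.isPrefixOf (c :: t) then new ++ pvRepl old new (t.drop (old.length - 1))
    else c :: pvRepl old new t
termination_by l => l.length
decreasing_by all_goals (simp [List.length_drop]; try omega)

-- A's composition of passes, as a fold over the map
def pvFoldA (M : List (List Char × List Char)) (s : List Char) : List Char :=
  M.foldl (fun t p => pvRepl p.1 p.2 t) s

lemma pv_go_eq (old new : List Char) (h : old ≠ []) :
    ∀ fuel l acc, l.length ≤ fuel →
      PySem.Chars.replace.go old new fuel l acc = acc.reverse ++ pvRepl old new l := by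
  intro fuel
  induction fuel with
  | zero =>
    intro l acc hl
    have : l = [] := List.length_eq_zero_iff.mp (Nat.le_zero.mp hl)
    subst this; simp [PySem.Chars.replace.go, pvRepl]
  | succ n ih =>
    intro l acc hl
    cases l with
    | nil => simp [PySem.Chars.replace.go, pvRepl]
    | cons c t =>
      rw [PySem.Chars.replace.go]
      by_cases hp : old.isPrefixOf (c :: t)
      · obtain ⟨o, os, rfl⟩ : ∃ o os, old = o :: os := by
          cases old with
          | nil => exact absurd rfl h
          | cons o os => exact ⟨o, os, rfl⟩
        simp only [hp, if_true]
        rw [ih _ _ (by simp at hl ⊢; omega)]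
        rw [pvRepl]
        simp [hp, List.drop_succ_cons]
      · have hp' : old.isPrefixOf (c :: t) = false := Bool.not_eq_true _ ▸ eq_false_of_ne_true hp
        simp only [hp', Bool.false_eq_true, if_false]
        rw [ih _ _ (by simp at hl ⊢; omega), pvRepl]
        simp [hp']

lemma pv_replace_eq (s old new : List Char) (h : old ≠ []) :
    PySem.Chars.replace s old new = pvRepl old new s := by
  rw [PySem.Chars.replace]
  rw [if_neg (by simp [List.isEmpty_iff, h])]
  simpa using pv_go_eq old new h s.length s [] le_rfl

-- a mismatch inside the first l₂.length positions kills prefix-hood for every tail t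
lemma pv_mismatch_not_prefix {l₁ l₂ : List Char}
    (hm : ∃ m < 12, ∃ a b, l₁[m]? = some a ∧ l₂[m]? = some b ∧ a ≠ b)
    (t : List Char) : ¬ l₁ <+: (l₂ ++ t) := by
  rintro ⟨r, hr⟩
  obtain ⟨m, -, a, b, ha, hb, hab⟩ := hm
  have h1 : (l₁ ++ r)[m]? = some a :=
    (List.getElem?_append_left (by simpa using (List.getElem?_eq_some_iff.mp ha).1)).trans ha
  have h2 : (l₂ ++ t)[m]? = some b :=
    (List.getElem?_append_left (by simpa using (List.getElem?_eq_some_iff.mp hb).1)).trans hb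
  rw [hr] at h1
  exact hab (by rw [h1] at h2; injection h2)

-- pvRepl copies any block that is free of the keys' head char
lemma pv_repl_copy {k : List Char} {hc : Char} (v : List Char)
    (hk : k.head? = some hc) :
    ∀ x s, hc ∉ x → pvRepl k v (x ++ s) = x ++ pvRepl k v s := by
  intro x
  induction x with
  | nil => simp
  | cons c x' ih =>
    intro s hx
    obtain ⟨k', rfl⟩ : ∃ k', k = hc :: k' := by
      cases k with
      | nil => simp at hk
      | cons a k' => simp at hk; exact ⟨k', by rw [hk]⟩
    have hne : ¬ (hc :: k').isPrefixOf (c :: (x' ++ s)) := by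
      simp only [List.isPrefixOf_iff_prefix, List.cons_prefix_cons]
      rintro ⟨rfl, -⟩
      exact hx (by simp)
    rw [List.cons_append, pvRepl, if_neg hne, ih s (fun h => hx (by simp [h]))]
    simp

lemma pv_repl_key {k : List Char} (v t : List Char) (h : k ≠ []) :
    pvRepl k v (k ++ t) = v ++ pvRepl k v t := by
  obtain ⟨c, k', rfl⟩ : ∃ c k', k = c :: k' := by
    cases k with
    | nil => exact absurd rfl h
    | cons c k' => exact ⟨c, k', rfl⟩
  rw [List.cons_append, pvRepl,
    if_pos (by rw [List.isPrefixOf_iff_prefix, ← List.cons_append]; exact List.prefix_append _ _)]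
  simp

-- a pattern-free prefix of pvRepl's output was already a prefix of the input
lemma pv_prefix_repl {k v : List Char} {vh : Char} (hv : v.head? = some vh) :
    ∀ n t y, t.length ≤ n → vh ∉ y → y <+: pvRepl k v t → y <+: t := by
  intro n
  induction n with
  | zero =>
    intro t y ht _ hp
    have : t = [] := List.length_eq_zero_iff.mp (Nat.le_zero.mp ht)
    subst this; simpa [pvRepl] using hp
  | succ n ih =>
    intro t y ht hy hp
    cases t with
    | nil => simpa [pvRepl] using hp
    | cons c t' =>
      rw [pvRepl] at hp
      by_cases hk : k.isPrefixOf (c :: t')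
      · rw [if_pos hk] at hp
        cases y with
        | nil => exact List.nil_prefix
        | cons a y' =>
          obtain ⟨v', rfl⟩ : ∃ v', v = vh :: v' := by
            cases v with
            | nil => simp at hv
            | cons b v' => simp at hv; exact ⟨v', by rw [hv]⟩
          rw [List.cons_append, List.cons_prefix_cons] at hp
          exact absurd hp.1 (by intro h; exact hy (by simp [h]))
      · rw [if_neg hk] at hp
        cases y with
        | nil => exact List.nil_prefix
        | cons a y' =>
          rw [List.cons_prefix_cons] at hp
          obtain ⟨rfl, hp'⟩ := hp
          have : y' <+: t' :=
            ih t' y' (by simp at ht; omega) (fun h => hy (by simp [h])) hp'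
          exact List.cons_prefix_cons.mpr ⟨rfl, this⟩

-- one safe char passes unchanged through the whole fold
lemma pv_fold_cons (M : List (List Char × List Char))
    (hv : ∀ p ∈ M, ∀ q ∈ M, p.2 ≠ [] ∧ ∀ ch ∈ p.2, ch ∉ q.1) :
    ∀ c t, (∀ p ∈ M, ¬ p.1 <+: (c :: t)) →
      pvFoldA M (c :: t) = c :: pvFoldA M t := by
  induction M with
  | nil => intro c t _; simp [pvFoldA]
  | cons p1 M' ih =>
    intro c t hne
    have h1 : ¬ p1.1 <+: (c :: t) := hne p1 (by simp)
    have hstep : pvRepl p1.1 p1.2 (c :: t) = c :: pvRepl p1.1 p1.2 t := by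
      rw [pvRepl, if_neg (by simpa [List.isPrefixOf_iff_prefix] using h1)]
    have hv1 : p1.2 ≠ [] := (hv p1 (by simp) p1 (by simp)).1
    obtain ⟨vh, hvh⟩ : ∃ vh, p1.2.head? = some vh := by
      cases hp : p1.2 with
      | nil => exact absurd hp hv1
      | cons a v' => exact ⟨a, by simp⟩
    have hne' : ∀ q ∈ M', ¬ q.1 <+: (c :: pvRepl p1.1 p1.2 t) := by
      intro q hq hpre
      cases hq1 : q.1 with
      | nil => exact hne q (by simp [hq]) (by simp [hq1])
      | cons a y' =>
        rw [hq1, List.cons_prefix_cons] at hpre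
        obtain ⟨rfl, hy'⟩ := hpre
        have hnotin : vh ∉ y' := by
          intro hmem
          have := (hv p1 (by simp) q (by simp [hq])).2 vh (by
            have := List.head?_eq_some_iff.mp hvh; obtain ⟨v', hv'⟩ := this; simp [hv'])
          exact this (by simp [hq1, hmem])
        have : y' <+: t := pv_prefix_repl hvh t.length t y' le_rfl hnotin hy'
        exact hne q (by simp [hq]) (by rw [hq1]; exact List.cons_prefix_cons.mpr ⟨rfl, this⟩)
    have hv' : ∀ p ∈ M', ∀ q ∈ M', p.2 ≠ [] ∧ ∀ ch ∈ p.2, ch ∉ q.1 :=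
      fun p hp q hq => hv p (by simp [hp]) q (by simp [hq])
    calc pvFoldA (p1 :: M') (c :: t)
        = pvFoldA M' (pvRepl p1.1 p1.2 (c :: t)) := rfl
      _ = pvFoldA M' (c :: pvRepl p1.1 p1.2 t) := by rw [hstep]
      _ = c :: pvFoldA M' (pvRepl p1.1 p1.2 t) := ih hv' c _ hne'
      _ = c :: pvFoldA (p1 :: M') t := rfl

-- a '&'-free block passes unchanged through the whole fold
lemma pv_fold_free (M : List (List Char × List Char))
    (hh : ∀ p ∈ M, p.1.head? = some '&') :
    ∀ x s, '&' ∉ x → pvFoldA M (x ++ s) = x ++ pvFoldA M s := by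
  induction M with
  | nil => intro x s _; simp [pvFoldA]
  | cons p1 M' ih =>
    intro x s hx
    have : pvRepl p1.1 p1.2 (x ++ s) = x ++ pvRepl p1.1 p1.2 s :=
      pv_repl_copy p1.2 (hh p1 (by simp)) x s hx
    calc pvFoldA (p1 :: M') (x ++ s)
        = pvFoldA M' (pvRepl p1.1 p1.2 (x ++ s)) := rfl
      _ = pvFoldA M' (x ++ pvRepl p1.1 p1.2 s) := by rw [this]
      _ = x ++ pvFoldA M' (pvRepl p1.1 p1.2 s) :=
          ih (fun p hp => hh p (by simp [hp])) x _ hx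
      _ = x ++ pvFoldA (p1 :: M') s := rfl

-- a key occurrence at the front is replaced by its value, by the whole fold
lemma pv_fold_key (M : List (List Char × List Char))
    (hh : ∀ p ∈ M, p.1.head? = some '&' ∧ '&' ∉ p.1.tail)
    (hv : ∀ p ∈ M, '&' ∉ p.2)
    (hmm : ∀ p ∈ M, ∀ q ∈ M, p.1 ≠ q.1 →
      ∃ m < 12, ∃ a b, p.1[m]? = some a ∧ q.1[m]? = some b ∧ a ≠ b)
    (hnd : (M.map Prod.fst).Nodup) :
    ∀ k v t, (k, v) ∈ M → pvFoldA M (k ++ t) = v ++ pvFoldA M t := by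
  induction M with
  | nil => intro k v t h; simp at h
  | cons p1 M' ih =>
    intro k v t hkv
    have hk_ne : k ≠ [] := by
      intro h
      have := (hh (k, v) hkv).1
      rw [h] at this; simp at this
    by_cases heq : p1.1 = k
    · -- the head pair is (k, v) (keys are Nodup)
      have hp1 : p1 = (k, v) := by
        rcases List.mem_cons.mp hkv with h | h
        · rw [← h, ← heq]
        · exfalso
          have : k ∈ M'.map Prod.fst := List.mem_map.mpr ⟨(k, v), h, rfl⟩
          rw [List.map_cons] at hnd
          exact (List.nodup_cons.mp hnd).1 (heq ▸ this)
      subst hp1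
      have hstep : pvRepl k v (k ++ t) = v ++ pvRepl k v t := pv_repl_key v t hk_ne
      calc pvFoldA ((k, v) :: M') (k ++ t)
          = pvFoldA M' (pvRepl k v (k ++ t)) := rfl
        _ = pvFoldA M' (v ++ pvRepl k v t) := by rw [hstep]
        _ = v ++ pvFoldA M' (pvRepl k v t) :=
            pv_fold_free M' (fun p hp => (hh p (by simp [hp])).1) v _ (hv (k, v) (by simp))
        _ = v ++ pvFoldA ((k, v) :: M') t := rfl
    · -- the head pair's key misses everywhere inside k ++ t
      have hkM' : (k, v) ∈ M' := by
        rcases List.mem_cons.mp hkv with h | h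
        · exact absurd (by rw [← h]) heq
        · exact h
      have hnp : ¬ p1.1 <+: (k ++ t) :=
        pv_mismatch_not_prefix
          (hmm p1 (by simp) (k, v) (by simp [hkM']) heq) t
      obtain ⟨c, k', rfl⟩ : ∃ c k', k = c :: k' := by
        cases k with
        | nil => exact absurd rfl hk_ne
        | cons c k' => exact ⟨c, k', rfl⟩
      have hc : c = '&' := by
        have := (hh (c :: k', v) hkv).1; simpa using this
      have hk'free : '&' ∉ k' := by
        have := (hh (c :: k', v) hkv).2; simpa using this
      have hstep : pvRepl p1.1 p1.2 ((c :: k') ++ t) = (c :: k') ++ pvRepl p1.1 p1.2 t := by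
        rw [List.cons_append, pvRepl,
          if_neg (by simpa [List.isPrefixOf_iff_prefix, List.cons_append] using hnp)]
        rw [pv_repl_copy p1.2 (hh p1 (by simp)).1 k' t (hc ▸ hk'free)]
        simp
      have ih' := ih (fun p hp => hh p (by simp [hp])) (fun p hp => hv p (by simp [hp]))
        (fun p hp q hq => hmm p (by simp [hp]) q (by simp [hq]))
        (by rw [List.map_cons] at hnd; exact (List.nodup_cons.mp hnd).2)
        (c :: k') v (pvRepl p1.1 p1.2 t) hkM'
      calc pvFoldA (p1 :: M') ((c :: k') ++ t)
          = pvFoldA M' (pvRepl p1.1 p1.2 ((c :: k') ++ t)) := rfl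
        _ = pvFoldA M' ((c :: k') ++ pvRepl p1.1 p1.2 t) := by rw [hstep]
        _ = v ++ pvFoldA M' (pvRepl p1.1 p1.2 t) := ih'
        _ = v ++ pvFoldA (p1 :: M') t := rfl

-- facts about the concrete map, checked by computation
lemma pvMapC_heads : ∀ p ∈ pvMapC, p.1.head? = some '&' ∧ '&' ∉ p.1.tail := by decide
lemma pvMapC_vals_amp : ∀ p ∈ pvMapC, '&' ∉ p.2 := by decide
lemma pvMapC_vals : ∀ p ∈ pvMapC, ∀ q ∈ pvMapC, p.2 ≠ [] ∧ ∀ ch ∈ p.2, ch ∉ q.1 := by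
  intro p hp q hq
  fin_cases hp <;> fin_cases hq <;>
    exact ⟨by decide, by intro ch hch; simp at hch; subst hch; decide⟩
lemma pvMapC_mism : ∀ p ∈ pvMapC, ∀ q ∈ pvMapC, p.1 ≠ q.1 →
    ∃ m < 12, ∃ a b, p.1[m]? = some a ∧ q.1[m]? = some b ∧ a ≠ b := by
  intro p hp q hq
  fin_cases hp <;> fin_cases hq <;> intro hne <;>
    first
      | exact absurd rfl hne
      | exact ⟨8, by omega, _, _, rfl, rfl, by decide⟩
      | exact ⟨10, by omega, _, _, rfl, rfl, by decide⟩
lemma pvMapC_nodup : (pvMapC.map Prod.fst).Nodup := by decide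
lemma pvMapC_len : ∀ p ∈ pvMapC, p.1.length = 12 := by decide
lemma pvMapC_lookup_some : ∀ p ∈ pvMapC, (pvMapC.lookup p.1).isSome := by decide

lemma pv_lookup_mem {k v : List Char} :
    ∀ {M : List (List Char × List Char)}, M.lookup k = some v → (k, v) ∈ M := by
  intro M
  induction M with
  | nil => intro h; simp [List.lookup] at h
  | cons p M' ih =>
    obtain ⟨a, b⟩ := p
    intro h
    by_cases he : (k == a) = true
    · have ha : a = k := by have := eq_of_beq he; rw [this]
      rw [List.lookup] at h
      simp [he] at h
      simp [ha, h]
    · have he' : (k == a) = false := by simpa using he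
      rw [List.lookup] at h
      simp [he'] at h
      exact List.mem_cons.mpr (Or.inr (ih h))

-- the main equivalence of the two traversals
lemma pv_loop_eq : ∀ n (s : List Char), s.length ≤ n → pvFoldA pvMapC s = pvBLoop s := by
  intro n
  induction n with
  | zero =>
    intro s hs
    have : s = [] := List.length_eq_zero_iff.mp (Nat.le_zero.mp hs)
    subst this
    simp [pvFoldA, pvMapC, pvBLoop, pvRepl]
  | succ n ih =>
    intro s hs
    cases s with
    | nil => simp [pvFoldA, pvMapC, pvBLoop, pvRepl]
    | cons c t =>
      cases hk : pvMapC.lookup (List.take 12 (c :: t)) with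
      | some v =>
        have hmem : (List.take 12 (c :: t), v) ∈ pvMapC := pv_lookup_mem hk
        have hlen : (List.take 12 (c :: t)).length = 12 := pvMapC_len _ hmem
        have hc : c = '&' := by
          have := (pvMapC_heads _ hmem).1
          rw [List.take_succ_cons] at this
          simpa using this
        have hA : pvFoldA pvMapC (c :: t) = v ++ pvFoldA pvMapC (List.drop 12 (c :: t)) := by
          conv_lhs => rw [← List.take_append_drop 12 (c :: t)]
          exact pv_fold_key pvMapC pvMapC_heads pvMapC_vals_amp pvMapC_mism pvMapC_nodup
            _ v _ hmem
        have hk' : pvMapC.lookup ('&' :: List.take 11 t) = some v := by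
          rw [← hc, ← List.take_succ_cons]; exact hk
        have hB : pvBLoop (c :: t) = v ++ pvBLoop (List.drop 11 t) := by
          rw [pvBLoop]
          simp [hc, hk']
        rw [hA, hB, List.drop_succ_cons]
        congr 1
        exact ih _ (by simp [List.length_drop]; simp at hs; omega)
      | none =>
        have hnp : ∀ p ∈ pvMapC, ¬ p.1 <+: (c :: t) := by
          intro p hp hpre
          have hlen : p.1.length = 12 := pvMapC_len p hp
          have : p.1 = List.take 12 (c :: t) := by
            have := List.prefix_iff_eq_take.mp hpre
            rwa [hlen] at this
          have hsome := pvMapC_lookup_some p hp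
          rw [this, hk] at hsome
          simp at hsome
        have hA : pvFoldA pvMapC (c :: t) = c :: pvFoldA pvMapC t :=
          pv_fold_cons pvMapC pvMapC_vals c t hnp
        have hk' : pvMapC.lookup (c :: List.take 11 t) = none := by
          rw [← List.take_succ_cons]; exact hk
        have hB : pvBLoop (c :: t) = c :: pvBLoop t := by
          rw [pvBLoop]
          rcases eq_or_ne c '&' with hc | hc
          · subst hc; simp [hk']
          · simp [hc]
        rw [hA, hB]
        congr 1
        exact ih t (by simp at hs; omega)

-- the string literals of A's dict, as char lists
lemma pv_tl1 : "&amp;#x2713;".toList = ['&','a','m','p',';','#','x','2','7','1','3',';'] := by decide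
lemma pv_tl2 : "&amp;#x2717;".toList = ['&','a','m','p',';','#','x','2','7','1','7',';'] := by decide
lemma pv_tl3 : "&amp;#x2192;".toList = ['&','a','m','p',';','#','x','2','1','9','2',';'] := by decide
lemma pv_tl4 : "&amp;#x2190;".toList = ['&','a','m','p',';','#','x','2','1','9','0',';'] := by decide
lemma pv_tl5 : "&amp;#x2191;".toList = ['&','a','m','p',';','#','x','2','1','9','1',';'] := by decide
lemma pv_tl6 : "&amp;#x2193;".toList = ['&','a','m','p',';','#','x','2','1','9','3',';'] := by decide
lemma pv_tv1 : "✓".toList = ['✓'] := by decide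
lemma pv_tv2 : "✗".toList = ['✗'] := by decide
lemma pv_tv3 : "→".toList = ['→'] := by decide
lemma pv_tv4 : "←".toList = ['←'] := by decide
lemma pv_tv5 : "↑".toList = ['↑'] := by decide
lemma pv_tv6 : "↓".toList = ['↓'] := by decide

-- A's fold of Str.replace passes, moved to char lists
lemma pv_portA_eq (text : String) :
    preserve_emojis_py text = String.ofList (pvFoldA pvMapC text.toList) := by
  simp only [preserve_emojis_py, pvEmojiMap, pvFoldA, pvMapC, List.foldl,
    PySem.Str.replace, String.toList_ofList]
  rw [pv_replace_eq _ _ _ (by decide), pv_replace_eq _ _ _ (by decide),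
    pv_replace_eq _ _ _ (by decide), pv_replace_eq _ _ _ (by decide),
    pv_replace_eq _ _ _ (by decide), pv_replace_eq _ _ _ (by decide)]
  simp only [pv_tl1, pv_tl2, pv_tl3, pv_tl4, pv_tl5, pv_tl6,
    pv_tv1, pv_tv2, pv_tv3, pv_tv4, pv_tv5, pv_tv6]

-- ===== VERDICT (by name: the statement is the Claim_ definition above) =====
theorem preserve_emojis_py_spec : Claim_equal_preserve_emojis_py := by
  intro text _
  unfold Spec_preserve_emojis_py preserve_emojis_py_alt
  rw [pv_portA_eq]
  congr 1
  exact pv_loop_eq text.toList.length text.toList le_rfl
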